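-- pv_equiv track=rewrite | github.com/anonym-scientist/cut-qaoa-paper | circuit_cutting/postprocess.py | _get_all_keys_from_reduced
-- ===== SOURCE A (Python) =====
-- GATE_COMBINATIONS_SUMS = [("P_0+P_1", "I+Z"), ("I+Z", "P_0+P_1")]
--
-- GATE_COMBINATIONS_RZZ_SUMS = [("P_1-P_0", "RZ_minus-RZ_plus"), ("RZ_minus-RZ_plus", "P_1-P_0")]
--
-- def _get_all_keys_from_reduced(gate_combo_list, rzz=False):
--     all_gate_combo_lists = [[]]
--     last_update = -1
--     if rzz:
--         gate_combo_sums = GATE_COMBINATIONS_RZZ_SUMS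
--         projection_top = [("P_0", "RZ_plus"), ("P_1", "RZ_plus"), ("P_0", "RZ_minus"), ("P_1", "RZ_minus")]
--         projection_bot = [("RZ_plus", "P_0"), ("RZ_plus", "P_1"), ("RZ_minus", "P_0"), ("RZ_minus", "P_1")]
--     else:
--         gate_combo_sums = GATE_COMBINATIONS_SUMS
--         projection_top = [("P_0", "I"), ("P_1", "I"), ("P_0", "Z"), ("P_1", "Z")]
--         projection_bot = [("I", "P_0"), ("I", "P_1"), ("Z", "P_0"), ("Z", "P_1")]
--
--     for current_idx, gate_combo in enumerate(gate_combo_list):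
--         if gate_combo in gate_combo_sums:
--             old_all_gate_combo_lists = all_gate_combo_lists
--             all_gate_combo_lists = []
--             if last_update - current_idx + 1 < 0:
--                 append = gate_combo_list[last_update + 1:current_idx]
--             else:
--                 append = []
--
--             if gate_combo[0].startswith("P"):
--                 for gcl in old_all_gate_combo_lists:
--                     gcl.extend(append)
--                     for gate in projection_top:
--                         copy_list = gcl.copy()
--                         copy_list.append(gate)
--                         all_gate_combo_lists.append(copy_list)
--             else:
--                 for gcl in old_all_gate_combo_lists:
--                     gcl.extend(append)
--                     for gate in projection_bot:
--                         copy_list = gcl.copy()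
--                         copy_list.append(gate)
--                         all_gate_combo_lists.append(copy_list)
--             last_update = current_idx
--     if last_update < len(gate_combo_list) - 1:
--         append = gate_combo_list[last_update + 1:]
--         for gcl in all_gate_combo_lists:
--             gcl.extend(append)
--
--     return all_gate_combo_lists
-- ===== SOURCE B (Python) =====
-- GATE_COMBINATIONS_SUMS = [("P_0+P_1", "I+Z"), ("I+Z", "P_0+P_1")]
--
-- GATE_COMBINATIONS_RZZ_SUMS = [("P_1-P_0", "RZ_minus-RZ_plus"), ("RZ_minus-RZ_plus", "P_1-P_0")]
--
-- def _get_all_keys_from_reduced(gate_combo_list, rzz=False):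
--     if rzz:
--         sums = GATE_COMBINATIONS_RZZ_SUMS
--         projection_top = [("P_0", "RZ_plus"), ("P_1", "RZ_plus"), ("P_0", "RZ_minus"), ("P_1", "RZ_minus")]
--         projection_bot = [("RZ_plus", "P_0"), ("RZ_plus", "P_1"), ("RZ_minus", "P_0"), ("RZ_minus", "P_1")]
--     else:
--         sums = GATE_COMBINATIONS_SUMS
--         projection_top = [("P_0", "I"), ("P_1", "I"), ("P_0", "Z"), ("P_1", "Z")]
--         projection_bot = [("I", "P_0"), ("I", "P_1"), ("Z", "P_0"), ("Z", "P_1")]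
--
--     def expand(lst):
--         if not lst:
--             return [[]]
--         combo, rest = lst[0], lst[1:]
--         tails = expand(rest)
--         if combo in sums:
--             opts = projection_top if combo[0].startswith("P") else projection_bot
--             return [[g] + t for g in opts for t in tails]
--         return [[combo] + t for t in tails]
--
--     return expand(gate_combo_list)
-- ===== Notes on version B (the rewrite author's own statement) =====
-- stated objective: simpler
-- what changed: Replaces A's iterative accumulator with absolute enumerate indices, list slices and a final tail-patch step by a direct head-first structural recursion that expands the list in one pass.
import Mathlib
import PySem

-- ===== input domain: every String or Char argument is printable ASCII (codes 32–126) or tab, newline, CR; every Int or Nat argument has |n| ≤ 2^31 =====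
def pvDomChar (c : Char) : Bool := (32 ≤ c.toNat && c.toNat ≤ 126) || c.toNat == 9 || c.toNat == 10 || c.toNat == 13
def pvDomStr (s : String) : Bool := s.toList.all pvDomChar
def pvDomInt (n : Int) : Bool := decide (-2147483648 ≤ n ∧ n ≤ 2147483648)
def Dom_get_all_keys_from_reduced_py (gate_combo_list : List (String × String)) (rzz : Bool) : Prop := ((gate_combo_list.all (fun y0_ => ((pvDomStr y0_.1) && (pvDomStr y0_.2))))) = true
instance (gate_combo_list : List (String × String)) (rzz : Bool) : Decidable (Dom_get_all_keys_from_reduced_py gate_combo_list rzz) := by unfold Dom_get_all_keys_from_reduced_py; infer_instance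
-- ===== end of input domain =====

-- B replaces A's iterative accumulator (absolute indices, slices, final tail patch) by a
-- direct head-first structural recursion; objective: simpler, same cost.

-- shared literal tables (module constants / the two projection tables of the Python sources)
def pvSums (rzz : Bool) : List (String × String) :=
  if rzz then [("P_1-P_0", "RZ_minus-RZ_plus"), ("RZ_minus-RZ_plus", "P_1-P_0")]
  else [("P_0+P_1", "I+Z"), ("I+Z", "P_0+P_1")]

def pvTop (rzz : Bool) : List (String × String) :=
  if rzz then [("P_0", "RZ_plus"), ("P_1", "RZ_plus"), ("P_0", "RZ_minus"), ("P_1", "RZ_minus")]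
  else [("P_0", "I"), ("P_1", "I"), ("P_0", "Z"), ("P_1", "Z")]

def pvBot (rzz : Bool) : List (String × String) :=
  if rzz then [("RZ_plus", "P_0"), ("RZ_plus", "P_1"), ("RZ_minus", "P_0"), ("RZ_minus", "P_1")]
  else [("I", "P_0"), ("I", "P_1"), ("Z", "P_0"), ("Z", "P_1")]

-- ===== PORT A =====
-- A's for-loop over enumerate(gate_combo_list), state (all_gate_combo_lists, last_update).
-- Python mutates old lists (gcl.extend) before copying; only the fresh copies survive, so the
-- flatMap below computes the same lists.
def pvALoop (L sums top bot : List (String × String)) :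
    List (Int × (String × String)) → List (List (String × String)) × Int →
    List (List (String × String)) × Int
  | [], st => st
  | (i, gc) :: rest, (acc, last) =>
    if sums.contains gc then
      let app := if last - i + 1 < 0 then PySem.List.slice L (some (last + 1)) (some i) else []
      let opts := if PySem.Str.startswith gc.1 "P" then top else bot
      pvALoop L sums top bot rest
        (acc.flatMap (fun gcl => opts.map (fun g => (gcl ++ app) ++ [g])), i)
    else pvALoop L sums top bot rest (acc, last)

def get_all_keys_from_reduced_py (gate_combo_list : List (String × String)) (rzz : Bool) :
    List (List (String × String)) :=
  let sums := pvSums rzz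
  let top := pvTop rzz
  let bot := pvBot rzz
  let st := pvALoop gate_combo_list sums top bot (PySem.List.enumerate gate_combo_list 0) ([[]], -1)
  if st.2 < PySem.List.len gate_combo_list - 1 then
    st.1.map (fun gcl => gcl ++ PySem.List.slice gate_combo_list (some (st.2 + 1)) none)
  else st.1

-- ===== PORT B =====
-- Source B's expand: head-first recursion
def pvExpand (sums top bot : List (String × String)) :
    List (String × String) → List (List (String × String))
  | [] => [[]]
  | gc :: rest =>
    let tails := pvExpand sums top bot rest
    if sums.contains gc then
      let opts := if PySem.Str.startswith gc.1 "P" then top else bot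
      opts.flatMap (fun g => tails.map (fun t => g :: t))
    else tails.map (fun t => gc :: t)

def get_all_keys_from_reduced_py_alt (gate_combo_list : List (String × String)) (rzz : Bool) :
    List (List (String × String)) :=
  pvExpand (pvSums rzz) (pvTop rzz) (pvBot rzz) gate_combo_list

-- ===== PRECONDITION & SPEC =====
def Spec_get_all_keys_from_reduced_py (gate_combo_list : List (String × String)) (rzz : Bool) (out : List (List (String × String))) : Prop := out = get_all_keys_from_reduced_py_alt gate_combo_list rzz
instance (gate_combo_list : List (String × String)) (rzz : Bool) (out : List (List (String × String))) : Decidable (Spec_get_all_keys_from_reduced_py gate_combo_list rzz out) := by unfold Spec_get_all_keys_from_reduced_py; infer_instance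

-- ===== CLAIM (what is proved, stated in full; the proofs are below) =====
def Claim_equal_get_all_keys_from_reduced_py : Prop := ∀ (gate_combo_list : List (String × String)) (rzz : Bool), Dom_get_all_keys_from_reduced_py gate_combo_list rzz → Spec_get_all_keys_from_reduced_py gate_combo_list rzz (get_all_keys_from_reduced_py gate_combo_list rzz)

-- ===== LEMMAS AND PROOFS =====

-- Invariant of A's loop: running over the suffix s = L.drop k with pending segment
-- L[last+1:k], then applying A's final tail patch, yields each accumulator entry
-- extended by the pending segment and every expansion of the suffix, in B's order.
lemma pvALoop_spec (sums top bot : List (String × String)) (L : List (String × String)) :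
    ∀ (s : List (String × String)) (k : Nat) (last : Int)
      (acc : List (List (String × String))),
      -1 ≤ last → last ≤ (k : Int) - 1 → L.drop k = s →
      (let st := pvALoop L sums top bot (PySem.List.enumerate s k) (acc, last);
       if st.2 < PySem.List.len L - 1 then
         st.1.map (fun gcl => gcl ++ PySem.List.slice L (some (st.2 + 1)) none)
       else st.1)
      = acc.flatMap (fun a => (pvExpand sums top bot s).map
          (fun t => a ++ PySem.List.slice L (some (last + 1)) (some (k : Int)) ++ t)) := by
  intro s
  induction s with
  | nil =>
    intro k last acc h1 h2 hdrop
    have hlen : L.length ≤ k := List.drop_eq_nil_iff.mp hdrop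
    have h0 : (0:Int) ≤ last + 1 := by omega
    have hsl : PySem.List.slice L (some (last + 1)) (some (k : Int)) = L.drop (last+1).toNat := by
      rw [PySem.List.slice_toNat L h0 (by positivity)]
      exact List.take_of_length_le (by simp; omega)
    simp only [PySem.List.enumerate_nil, pvALoop, pvExpand, hsl]
    by_cases hb : last < PySem.List.len L - 1
    · simp only [hb, if_pos, PySem.List.slice_from L h0]
      simp [List.map_eq_flatMap]
    · simp only [hb, if_neg, not_false_iff]
      have : L.drop (last+1).toNat = [] := by
        apply List.drop_eq_nil_iff.mpr
        simp [PySem.List.len_eq] at hb; omega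
      simp [this, List.flatMap_singleton']
  | cons gc rest ih =>
    intro k last acc h1 h2 hdrop
    have hk : k < L.length := by
      by_contra h
      rw [List.drop_eq_nil_iff.mpr (Nat.le_of_not_lt h)] at hdrop
      simp at hdrop
    have hcons := List.drop_eq_getElem_cons hk
    rw [hcons] at hdrop
    have hget : L[k] = gc := (List.cons.injEq _ _ _ _ ▸ hdrop).1
    have hrest : L.drop (k+1) = rest := (List.cons.injEq _ _ _ _ ▸ hdrop).2
    have h0 : (0:Int) ≤ last + 1 := by omega
    rw [PySem.List.enumerate_cons]
    by_cases hc : sums.contains gc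
    · -- sum element: choices are appended
      have happ : (if last - (k:Int) + 1 < 0 then
            PySem.List.slice L (some (last + 1)) (some (k:Int)) else [])
          = PySem.List.slice L (some (last + 1)) (some (k:Int)) := by
        split_ifs with hlt
        · rfl
        · have hlast : last = (k:Int) - 1 := by omega
          rw [hlast]
          rw [PySem.List.slice_toNat L (by omega) (by positivity)]
          simp
      simp only [pvALoop, hc, if_pos, happ]
      have ihk := ih (k+1) (k:Int)
        (acc.flatMap (fun gcl => (if PySem.Str.startswith gc.1 "P" then top else bot).map
          (fun g => (gcl ++ PySem.List.slice L (some (last + 1)) (some (k:Int))) ++ [g])))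
        (by omega) (by push_cast; omega) hrest
      rw [show ((k:Int) + 1) = ((k+1 : Nat) : Int) by push_cast; ring] at *
      rw [ihk]
      have hnil : PySem.List.slice L (some ((k+1:Nat):Int)) (some ((k+1:Nat):Int)) = [] := by
        rw [PySem.List.slice_natCast L]; simp
      simp only [pvExpand, hc, if_pos, hnil]
      simp [List.flatMap_assoc, List.flatMap_map, List.map_flatMap, List.map_map,
        Function.comp_def, List.append_assoc]
    · -- plain element: it joins the pending segment
      simp only [pvALoop, hc, if_neg, Bool.false_eq_true, not_false_iff]
      have ihk := ih (k+1) last acc (by omega) (by push_cast; omega) hrest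
      rw [show ((k:Int) + 1) = ((k+1 : Nat) : Int) by push_cast; ring, ihk]
      have hext : PySem.List.slice L (some (last + 1)) (some ((k+1:Nat):Int))
          = PySem.List.slice L (some (last + 1)) (some (k:Int)) ++ [gc] := by
        rw [PySem.List.slice_toNat L h0 (by positivity), PySem.List.slice_toNat L h0 (by positivity)]
        have ha : (last+1).toNat ≤ k := by omega
        have : ((k+1:Nat):Int).toNat - (last+1).toNat = ((k:Int).toNat - (last+1).toNat) + 1 := by
          simp; omega
        rw [this, List.take_add_one, List.getElem?_drop]
        have : (last+1).toNat + ((k:Int).toNat - (last+1).toNat) = k := by simp; omega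
        rw [this, List.getElem?_eq_getElem hk, hget]
        rfl
      simp only [pvExpand, hc, if_neg, Bool.false_eq_true, not_false_iff, hext]
      simp [List.map_map, Function.comp_def, List.append_assoc]

-- ===== VERDICT (by name: the statement is the Claim_ definition above) =====
theorem get_all_keys_from_reduced_py_spec : Claim_equal_get_all_keys_from_reduced_py := by
  intro L rzz _
  unfold Spec_get_all_keys_from_reduced_py get_all_keys_from_reduced_py
    get_all_keys_from_reduced_py_alt
  have h := pvALoop_spec (pvSums rzz) (pvTop rzz) (pvBot rzz) L L 0 (-1) [[]]
    (by omega) (by omega) (by simp)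
  simp only [Nat.cast_zero] at h
  have hz : PySem.List.slice L (some (-1 + 1)) (some 0) = [] := by
    rw [show ((-1:Int) + 1) = 0 by ring, PySem.List.slice_toNat L le_rfl le_rfl]
    simp
  rw [hz] at h
  simpa using h
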